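-- pv_equiv track=rewrite | github.com/dennisjooo/act-natural | src/backend/agents/conversation_analyzer.py | check_similar_topics
-- ===== SOURCE A (Python) =====
-- def check_similar_topics(msg1: str, msg2: str) -> bool:
--     """Check if two messages discuss similar topics.
--
--     Compares two messages to determine if they are discussing related topics
--     by checking for shared keywords in predefined topic categories.
--
--     Args:
--         msg1 (str): First message to compare
--         msg2 (str): Second message to compare
--
--     Returns:
--         bool: True if the messages appear to discuss similar topics, False otherwise
--     """
--     topic_keywords = {
--         "mystery": ["journal", "key", "symbols", "passage", "chamber", "secret"],
--         "investigation": ["found", "discovered", "search", "look", "examine"],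
--         "speculation": ["think", "believe", "suspect", "perhaps", "maybe"],
--     }
--
--     msg1_lower = msg1.lower()
--     msg2_lower = msg2.lower()
--
--     return any(
--         any(word in msg1_lower for word in keywords) and
--         any(word in msg2_lower for word in keywords)
--         for keywords in topic_keywords.values()
--     )
-- ===== SOURCE B (Python) =====
-- _KEYWORD_BITS = [
--     ("journal", 1), ("key", 1), ("symbols", 1), ("passage", 1), ("chamber", 1), ("secret", 1),
--     ("found", 2), ("discovered", 2), ("search", 2), ("look", 2), ("examine", 2),
--     ("think", 4), ("believe", 4), ("suspect", 4), ("perhaps", 4), ("maybe", 4),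
-- ]
--
--
-- def _topic_mask(text):
--     mask = 0
--     for kw, bit in _KEYWORD_BITS:
--         if kw in text:
--             mask |= bit
--     return mask
--
--
-- def check_similar_topics(msg1: str, msg2: str) -> bool:
--     return (_topic_mask(msg1.lower()) & _topic_mask(msg2.lower())) != 0
-- ===== Notes on version B (the rewrite author's own statement) =====
-- stated objective: alternative
-- what changed: B flattens the category dict into one list of (keyword, bit) pairs and accumulates a single integer bitmask per message in one loop, returning whether the bitwise AND of the two masks is nonzero, instead of A's per-category AND of two any() generator scans over the dict values.
import Mathlib
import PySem

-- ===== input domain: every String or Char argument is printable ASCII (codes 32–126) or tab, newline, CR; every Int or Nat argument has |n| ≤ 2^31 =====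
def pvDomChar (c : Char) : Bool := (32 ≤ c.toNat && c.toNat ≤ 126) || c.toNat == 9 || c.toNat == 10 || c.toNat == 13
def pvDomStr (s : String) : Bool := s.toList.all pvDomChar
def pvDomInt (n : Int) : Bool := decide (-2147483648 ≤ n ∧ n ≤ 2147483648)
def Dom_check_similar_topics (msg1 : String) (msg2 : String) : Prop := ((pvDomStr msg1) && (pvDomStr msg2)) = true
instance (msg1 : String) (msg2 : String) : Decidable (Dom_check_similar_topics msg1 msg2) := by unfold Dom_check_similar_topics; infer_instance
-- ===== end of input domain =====

-- B flattens the dict into one (keyword, bit) list and folds a single integer bitmask per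
-- message, returning whether the two masks' bitwise AND is nonzero; objective: alternative
-- decomposition, same cost.

-- ===== PORT A =====
-- the hardcoded topic_keywords dict, in insertion order
def topicKeywordsA : PySem.Dict String (List String) :=
  PySem.Dict.mk
    [("mystery", ["journal", "key", "symbols", "passage", "chamber", "secret"]),
     ("investigation", ["found", "discovered", "search", "look", "examine"]),
     ("speculation", ["think", "believe", "suspect", "perhaps", "maybe"])]

def check_similar_topics (msg1 : String) (msg2 : String) : Bool :=
  let msg1_lower := PySem.Str.lower msg1
  let msg2_lower := PySem.Str.lower msg2
  (PySem.Dict.values topicKeywordsA).any (fun keywords =>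
    keywords.any (fun word => PySem.Str.isIn word msg1_lower) &&
    keywords.any (fun word => PySem.Str.isIn word msg2_lower))

-- ===== PORT B =====
-- _KEYWORD_BITS: flat list of (keyword, bit)
def keywordBits : List (String × Int) :=
  [("journal", 1), ("key", 1), ("symbols", 1), ("passage", 1), ("chamber", 1), ("secret", 1),
   ("found", 2), ("discovered", 2), ("search", 2), ("look", 2), ("examine", 2),
   ("think", 4), ("believe", 4), ("suspect", 4), ("perhaps", 4), ("maybe", 4)]

-- _topic_mask: single accumulator loop; Python `mask |= bit` is ported as Int.lor (exact:
-- Python's `|` on ints is bitwise or, which Int.lor computes)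
def topicMask (text : String) : Int :=
  keywordBits.foldl
    (fun mask p => if PySem.Str.isIn p.1 text then Int.lor mask p.2 else mask) 0

-- Python `(a & b) != 0` ported as Int.land … != 0 (exact: `&` on ints is bitwise and)
def check_similar_topics_alt (msg1 : String) (msg2 : String) : Bool :=
  Int.land (topicMask (PySem.Str.lower msg1)) (topicMask (PySem.Str.lower msg2)) != 0

-- ===== PRECONDITION & SPEC =====
def Spec_check_similar_topics (msg1 : String) (msg2 : String) (out : Bool) : Prop := out = check_similar_topics_alt msg1 msg2
instance (msg1 : String) (msg2 : String) (out : Bool) : Decidable (Spec_check_similar_topics msg1 msg2 out) := by unfold Spec_check_similar_topics; infer_instance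

-- ===== CLAIM (what is proved, stated in full; the proofs are below) =====
def Claim_equal_check_similar_topics : Prop := ∀ (msg1 : String) (msg2 : String), Dom_check_similar_topics msg1 msg2 → Spec_check_similar_topics msg1 msg2 (check_similar_topics msg1 msg2)

-- ===== LEMMAS AND PROOFS =====

-- whether lowered message m matches any keyword of a list
def pvAtom (kws : List String) (m : String) : Bool :=
  kws.any (fun w => PySem.Str.isIn w (PySem.Str.lower m))

-- folding one category's keywords over a nonnegative accumulator: if no keyword matches,
-- the accumulator is unchanged
theorem pvFoldGroupN (t : String) (b acc : Nat) (kws : List String)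
    (h : kws.any (fun k => PySem.Str.isIn k t) = false) :
    (kws.map (fun k => (k, ((b : Nat) : Int)))).foldl
      (fun mask p => if PySem.Str.isIn p.1 t then Int.lor mask p.2 else mask) ((acc : Nat) : Int)
    = ((acc : Nat) : Int) := by
  induction kws with
  | nil => rfl
  | cons k rest ih =>
    rw [List.map_cons, List.foldl_cons]
    rw [List.any_cons, Bool.or_eq_false_iff] at h
    rw [if_neg (by rw [h.1]; exact Bool.false_ne_true), ih h.2]

-- … and if some keyword matches, the accumulator gains exactly bit b
theorem pvFoldGroupP (t : String) (b acc : Nat) (kws : List String)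
    (h : kws.any (fun k => PySem.Str.isIn k t) = true) :
    (kws.map (fun k => (k, ((b : Nat) : Int)))).foldl
      (fun mask p => if PySem.Str.isIn p.1 t then Int.lor mask p.2 else mask) ((acc : Nat) : Int)
    = (((acc ||| b : Nat)) : Int) := by
  induction kws generalizing acc with
  | nil => exact absurd h (by rw [List.any_nil]; exact Bool.false_ne_true)
  | cons k rest ih =>
    rw [List.map_cons, List.foldl_cons]
    cases hk : PySem.Str.isIn k t with
    | false =>
      rw [if_neg Bool.false_ne_true]
      rw [List.any_cons, hk, Bool.false_or] at h
      exact ih acc h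
    | true =>
      rw [if_pos rfl,
        show Int.lor ((acc : Nat) : Int) ((b : Nat) : Int) = (((acc ||| b : Nat)) : Int) from rfl]
      cases hrest : rest.any (fun k => PySem.Str.isIn k t) with
      | false => exact pvFoldGroupN t b (acc ||| b) rest hrest
      | true =>
        rw [ih (acc ||| b) hrest, Nat.lor_assoc, Nat.or_self]

-- the mask B's loop computes, characterised by the three per-category atoms
theorem pvMask_eq (m : String) :
    topicMask (PySem.Str.lower m) =
      ((((if pvAtom ["journal", "key", "symbols", "passage", "chamber", "secret"] m then (0 ||| 1 : Nat) else 0)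
          |> fun a => if pvAtom ["found", "discovered", "search", "look", "examine"] m then a ||| 2 else a)
          |> fun a => if pvAtom ["think", "believe", "suspect", "perhaps", "maybe"] m then a ||| 4 else a : Nat) : Int) := by
  have hsplit : keywordBits =
      (["journal", "key", "symbols", "passage", "chamber", "secret"].map (fun k => (k, ((1 : Nat) : Int)))) ++
      (["found", "discovered", "search", "look", "examine"].map (fun k => (k, ((2 : Nat) : Int)))) ++
      (["think", "believe", "suspect", "perhaps", "maybe"].map (fun k => (k, ((4 : Nat) : Int)))) := rfl
  unfold topicMask
  rw [hsplit, List.foldl_append, List.foldl_append,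
    show (0 : Int) = (((0 : Nat)) : Int) from rfl]
  cases h1 : ["journal", "key", "symbols", "passage", "chamber", "secret"].any
      (fun k => PySem.Str.isIn k (PySem.Str.lower m)) <;>
  cases h2 : ["found", "discovered", "search", "look", "examine"].any
      (fun k => PySem.Str.isIn k (PySem.Str.lower m)) <;>
  cases h3 : ["think", "believe", "suspect", "perhaps", "maybe"].any
      (fun k => PySem.Str.isIn k (PySem.Str.lower m)) <;>
  · (first | rw [pvFoldGroupP _ _ _ _ h1] | rw [pvFoldGroupN _ _ _ _ h1])
    (first | rw [pvFoldGroupP _ _ _ _ h2] | rw [pvFoldGroupN _ _ _ _ h2])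
    (first | rw [pvFoldGroupP _ _ _ _ h3] | rw [pvFoldGroupN _ _ _ _ h3])
    simp only [pvAtom, h1, h2, h3, Bool.false_eq_true, ite_true, ite_false]

theorem check_similar_topics_spec : Claim_equal_check_similar_topics := by
  intro m1 m2 _
  unfold Spec_check_similar_topics
  show check_similar_topics m1 m2 = check_similar_topics_alt m1 m2
  unfold check_similar_topics check_similar_topics_alt topicKeywordsA
  rw [pvMask_eq m1, pvMask_eq m2]
  cases h1 : pvAtom ["journal", "key", "symbols", "passage", "chamber", "secret"] m1 <;>
  cases h2 : pvAtom ["found", "discovered", "search", "look", "examine"] m1 <;>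
  cases h3 : pvAtom ["think", "believe", "suspect", "perhaps", "maybe"] m1 <;>
  cases h4 : pvAtom ["journal", "key", "symbols", "passage", "chamber", "secret"] m2 <;>
  cases h5 : pvAtom ["found", "discovered", "search", "look", "examine"] m2 <;>
  cases h6 : pvAtom ["think", "believe", "suspect", "perhaps", "maybe"] m2 <;>
  · have h1' := h1; have h2' := h2; have h3' := h3
    have h4' := h4; have h5' := h5; have h6' := h6
    simp only [pvAtom] at h1' h2' h3' h4' h5' h6'
    simp only [PySem.Dict.values, List.map, List.any_cons, List.any_nil,
      h1', h2', h3', h4', h5', h6']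
    decide
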